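-- pv_equiv track=rewrite | github.com/dimasgonzales/dataengineer-transformations-python | data_transformations/wordcount/word_count_transformer.py | __token_count_map
-- ===== SOURCE A (Python) =====
-- def __token_count_map(row):
--     count_map = {}
--
--     for token in row["words"]:
--         if len(token) == 0:
--             continue
--
--         if token not in count_map:
--             count_map.update({token: 1})
--         else:
--             count_map[token] += 1
--     return count_map
-- ===== SOURCE B (Python) =====
-- def __token_count_map(row):
--     words = [t for t in row["words"] if t]
--     return {t: words.count(t) for t in dict.fromkeys(words)}
-- ===== Notes on version B (the rewrite author's own statement) =====
-- stated objective: alternative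
-- what changed: Replaces the incremental membership-test/update dict loop with a declarative two-phase form: filter the non-empty tokens once, deduplicate them in first-occurrence order with dict.fromkeys, and build the result as a comprehension counting each distinct token with list.count.
import Mathlib
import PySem

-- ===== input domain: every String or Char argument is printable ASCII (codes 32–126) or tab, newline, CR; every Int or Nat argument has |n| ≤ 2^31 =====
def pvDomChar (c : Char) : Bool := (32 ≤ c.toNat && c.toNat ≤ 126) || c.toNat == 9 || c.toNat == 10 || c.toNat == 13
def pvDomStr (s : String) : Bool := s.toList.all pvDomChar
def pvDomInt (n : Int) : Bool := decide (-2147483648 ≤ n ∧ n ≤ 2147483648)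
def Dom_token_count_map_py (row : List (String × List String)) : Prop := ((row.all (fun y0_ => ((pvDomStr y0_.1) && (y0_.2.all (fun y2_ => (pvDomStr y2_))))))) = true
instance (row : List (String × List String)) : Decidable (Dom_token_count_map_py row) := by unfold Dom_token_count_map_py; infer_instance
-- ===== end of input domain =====

-- B builds the result by filter + ordered dedup + per-key count instead of A's incremental dict loop (alternative decomposition, same values).
-- ===== PORT A =====
def token_count_map_py (row : List (String × List String)) : List (String × Int) :=
  match (PySem.Dict.mk row).get? "words" with
  | none => []   -- unreachable under Pre_ (Python raises KeyError)
  | some words =>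
    (words.foldl (fun d token =>
      if PySem.Str.len token = 0 then d
      else if d.contains token = false then d.insert token 1
      else d.insert token (d.getD token 0 + 1)) PySem.Dict.empty).items

-- ===== PORT B =====
def token_count_map_py_alt (row : List (String × List String)) : List (String × Int) :=
  match (PySem.Dict.mk row).get? "words" with
  | none => []   -- unreachable under Pre_ (Python raises KeyError)
  | some ws =>
    let words := ws.filter (fun t => t ≠ "")
    (PySem.List.dedup words).map (fun t => (t, (words.count t : Int)))

-- ===== PRECONDITION & SPEC =====
-- Pre_ excludes rows without a "words" key, on which Python A raises KeyError (B raises there too).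
def Pre_token_count_map_py (row : List (String × List String)) : Prop := "words" ∈ row.map Prod.fst
instance (row : List (String × List String)) : Decidable (Pre_token_count_map_py row) := by unfold Pre_token_count_map_py; infer_instance
def pvWitness_token_count_map_py : (List (String × List String)) := [("words", ["a", "b", "a"])]
def Spec_token_count_map_py (row : List (String × List String)) (out : List (String × Int)) : Prop := out = token_count_map_py_alt row
instance (row : List (String × List String)) (out : List (String × Int)) : Decidable (Spec_token_count_map_py row out) := by unfold Spec_token_count_map_py; infer_instance

-- ===== CLAIM (what is proved, stated in full; the proofs are below) =====
def Claim_equal_token_count_map_py : Prop := ∀ (row : List (String × List String)), Dom_token_count_map_py row → Pre_token_count_map_py row → Spec_token_count_map_py row (token_count_map_py row)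

-- ===== LEMMAS AND PROOFS =====

-- len(token) == 0 is exactly token == "".
lemma tcm_len_eq_zero_iff (t : String) : PySem.Str.len t = 0 ↔ t = "" := by
  rw [PySem.Str.len_eq]
  constructor
  · intro h
    have h1 : t.toList.length = 0 := by exact_mod_cast h
    exact String.toList_inj.mp (by simp [List.length_eq_zero_iff.mp h1])
  · intro h; subst h; rfl

-- A's loop over the raw tokens equals the counting loop over the non-empty tokens.
lemma tcm_foldl_eq_counter (ws : List String) (d : PySem.Dict String Int) :
    ws.foldl (fun d token =>
      if PySem.Str.len token = 0 then d
      else if d.contains token = false then d.insert token 1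
      else d.insert token (d.getD token 0 + 1)) d
    = (ws.filter (fun t => t ≠ "")).foldl (fun d x => d.insert x (d.getD x 0 + 1)) d := by
  induction ws generalizing d with
  | nil => rfl
  | cons t ts ih =>
    simp only [List.foldl_cons, List.filter_cons]
    by_cases ht : t = ""
    · rw [if_pos ((tcm_len_eq_zero_iff t).mpr ht), ih, if_neg (by simp [ht])]
    · rw [if_neg (fun h => ht ((tcm_len_eq_zero_iff t).mp h)), if_pos (decide_eq_true ht),
        List.foldl_cons]
      by_cases hc : d.contains t = false
      · rw [if_pos hc, ih, PySem.Dict.getD_of_not_contains (h := hc)]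
        norm_num
      · rw [if_neg hc, ih]

theorem token_count_map_py_spec : Claim_equal_token_count_map_py := by
  intro row _ _
  unfold Spec_token_count_map_py token_count_map_py token_count_map_py_alt
  cases h : (PySem.Dict.mk row).get? "words" with
  | none => rfl
  | some ws =>
    simp only [tcm_foldl_eq_counter, PySem.Dict.foldl_insert_getD_add_one_eq_counter,
      PySem.Dict.items_counter, PySem.List.dedup_eq_ofList]
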